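-- pv_equiv track=rewrite | github.com/SzymonKowalik/dyskretna_wiadomosc | main.py | rozwiazanie
-- ===== SOURCE A (Python) =====
-- import math
--
-- def sprawdz_pozycje(pozycja, przyklad):
--     """Sprawdza czy pozycja w wyniku jest zerem czy jedynką."""
--     dl_czesci = 2 ** pozycja
--     polowa_czesci = dl_czesci // 2
--     ilosc_czesci = len(przyklad) // dl_czesci
--
--     zmiana = 0
--     bez_zmiany = 0
--
--     for i in range(ilosc_czesci):
--         czesc = przyklad[i*dl_czesci:(i+1)*dl_czesci]
--         for j in range(polowa_czesci):
--             if czesc[j] == czesc[j+polowa_czesci]: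
--                 bez_zmiany += 1
--             else:
--                 zmiana += 1
--     return '1' if zmiana > bez_zmiany else '0'
--
-- def wyzeruj(binarna, miejsca):
--     """Zwraca binarną liczbę z nałożoną maską zer."""
--     nowa_binarna = ''
--     for b, m in zip(binarna, miejsca):
--         if m == '0': nowa_binarna += '0'
--         else: nowa_binarna += b
--     return nowa_binarna
--
-- def zaszyfruj(wynik):
--     """Szyfruje wiadomosc bez negacji."""
--     szyfrowane = ''
--     for i in range(2**len(wynik)):
--         obecne = f"{bin(i)[2:]:0>{len(wynik)}}"
--         maska_obecne = wyzeruj(obecne, wynik)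
--         miejsce_szyfru = str(maska_obecne.count('1') % 2)
--         szyfrowane += miejsce_szyfru
--     return szyfrowane
--
-- def sprawdz_negacje(szyfrowane, przyklad):
--     """Sprawdza czy zaszyfrowany napis jest zanegowany czy nie"""
--     tabela_negacji = str.maketrans('01', '10')
--
--     bez_negacji = szyfrowane
--     z_negacja = szyfrowane.translate(tabela_negacji)
--
--     bez_negacji_zgodne = 0
--     z_negacja_zgodne = 0
--
--     for b, z, p in zip(bez_negacji, z_negacja, przyklad):
--         if b == p: bez_negacji_zgodne += 1
--         if z == p: z_negacja_zgodne += 1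
--     return '1' if z_negacja_zgodne > bez_negacji_zgodne else '0'
--
-- def rozwiazanie(przyklad):
--     """Zwraca rozwiązanie dla danego przykładu."""
--     ilosc_zmiennych = int(math.log2(len(przyklad))) # + 1 na negacje potem
--     wynik = ''
--     # Odszyfrowuje wiadomosc
--     for zmienna in range(1, ilosc_zmiennych+1):
--         wynik = sprawdz_pozycje(zmienna, przyklad) + wynik
--
--     szyfrowane = zaszyfruj(wynik)
--     # Dodanie bitu negacji do wyniku
--     wynik = sprawdz_negacje(szyfrowane, przyklad) + wynik
--
--     return wynik
-- ===== SOURCE B (Python) =====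
-- def rozwiazanie(przyklad):
--     def pary(c):
--         """Divide and conquer: mismatch/pair counts per stride, smallest stride first.
--         Adjacent pairs give the stride-1 counts; counts for every doubled stride are
--         the sums of the corresponding counts of the even and odd subsequences."""
--         it = iter(c)
--         pairs = list(zip(it, it))
--         if not pairs:
--             return []
--         d = sum(1 for a, b in pairs if a != b)
--         e = [a for a, b in pairs]
--         o = [b for a, b in pairs]
--         return [(d, len(pairs))] + [(de + do, pe + po)
--                                     for (de, pe), (do, po) in zip(pary(e), pary(o))]
--
--     poziomy = pary(przyklad)
--     maska = ''.join('1' if 2 * d > p else '0' for d, p in reversed(poziomy))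
--
--     # codeword by doubling: each half repeats, complemented when that variable is set
--     kod = '0'
--     for bit in reversed(maska):
--         kod += ''.join('1' if ch == '0' else '0' for ch in kod) if bit == '1' else kod
--
--     zgodne = sum(k == p for k, p in zip(kod, przyklad))
--     odwrotne = sum(('1' if k == '0' else '0') == p for k, p in zip(kod, przyklad))
--     return ('1' if odwrotne > zgodne else '0') + maska
-- ===== Notes on version B (the rewrite author's own statement) =====
-- stated objective: alternative
-- what changed: Replaces A's three staged index-arithmetic passes (per-variable block/slice scans, codeword synthesis by formatting each index in binary and masking it, and a translate-based negation scan) by a divide-and-conquer decomposition: one recursive deinterleave computes the mismatch/pair counts of ALL strides at once (stride-2s counts are the sums of the stride-s counts of the even and odd subsequences), and the reference codeword is grown by successive doubling (each half repeated, complemented when that variable bit is set) instead of per-index parity evaluation.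
import Mathlib
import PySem

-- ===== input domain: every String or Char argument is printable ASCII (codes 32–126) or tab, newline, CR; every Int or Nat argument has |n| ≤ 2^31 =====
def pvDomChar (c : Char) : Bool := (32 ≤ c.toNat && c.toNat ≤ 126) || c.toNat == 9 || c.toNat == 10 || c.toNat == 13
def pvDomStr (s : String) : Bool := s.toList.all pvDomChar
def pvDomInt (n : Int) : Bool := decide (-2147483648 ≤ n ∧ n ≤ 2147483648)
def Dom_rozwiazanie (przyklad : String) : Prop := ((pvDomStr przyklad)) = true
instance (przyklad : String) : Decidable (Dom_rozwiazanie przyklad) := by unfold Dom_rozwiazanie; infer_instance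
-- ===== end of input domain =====

-- B decodes by divide and conquer (recursive deinterleave for all stride counts at once,
-- codeword grown by doubling) instead of A's three index-arithmetic passes; equal value, similar cost.

-- ===== PORT A =====
def sprawdzPozycje (pozycja : Nat) (przyklad : List Char) : Char :=
  let dlCzesci := 2 ^ pozycja
  let polowaCzesci := dlCzesci / 2
  let iloscCzesci := przyklad.length / dlCzesci
  let zb := (List.range iloscCzesci).foldl (fun (zb : Nat × Nat) i =>
    let czesc := PySem.List.slice przyklad (some ((i * dlCzesci : Nat) : Int)) (some (((i + 1) * dlCzesci : Nat) : Int))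
    (List.range polowaCzesci).foldl (fun zb j =>
      if PySem.List.pyGetD czesc ((j : Nat) : Int) ' ' == PySem.List.pyGetD czesc ((j + polowaCzesci : Nat) : Int) ' '
      then (zb.1, zb.2 + 1) else (zb.1 + 1, zb.2)) zb) (0, 0)
  if zb.1 > zb.2 then '1' else '0'

def wyzeruj (binarna miejsca : List Char) : List Char :=
  (binarna.zip miejsca).foldl (fun nowa bm =>
    if bm.2 == '0' then nowa ++ ['0'] else nowa ++ [bm.1]) []

def zaszyfruj (wynik : List Char) : List Char :=
  (List.range (2 ^ wynik.length)).foldl (fun szyfrowane i =>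
    -- f"{bin(i)[2:]:0>{len(wynik)}}": the binary digits of i left-padded with '0' to the width
    let obecne := List.replicate (wynik.length - (PySem.Int.toBinChars ((i : Nat) : Int)).length) '0'
      ++ PySem.Int.toBinChars ((i : Nat) : Int)
    let maskaObecne := wyzeruj obecne wynik
    let miejsceSzyfru := PySem.Int.toChars (((PySem.Chars.count maskaObecne ['1']) % 2 : Nat) : Int)
    szyfrowane ++ miejsceSzyfru) []

def sprawdzNegacje (szyfrowane przyklad : List Char) : Char :=
  let zNegacja := szyfrowane.map (fun ch => if ch == '0' then '1' else if ch == '1' then '0' else ch)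
  let bz := (szyfrowane.zip (zNegacja.zip przyklad)).foldl (fun (bz : Nat × Nat) t =>
    ((if t.1 == t.2.2 then bz.1 + 1 else bz.1), (if t.2.1 == t.2.2 then bz.2 + 1 else bz.2))) (0, 0)
  if bz.2 > bz.1 then '1' else '0'

def rozwiazanie (przyklad : String) : String :=
  let cs := przyklad.toList
  -- int(math.log2(len(przyklad))): exact floor of log2 on every realistic length
  let iloscZmiennych := Nat.log 2 cs.length
  let wynik := (List.range' 1 iloscZmiennych).foldl (fun wynik zmienna => sprawdzPozycje zmienna cs :: wynik) []
  let szyfrowane := zaszyfruj wynik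
  String.mk (sprawdzNegacje szyfrowane cs :: wynik)

-- ===== PORT B =====
-- list(zip(it, it)) on an iterator: consecutive pairs, odd tail dropped
def pairUp : List Char → List (Char × Char)
  | a :: b :: rest => (a, b) :: pairUp rest
  | _ => []

theorem pairUp_length : ∀ (c : List Char), (pairUp c).length = c.length / 2
  | [] => by simp [pairUp]
  | [_] => by simp [pairUp]
  | a :: b :: rest => by
    have ih := pairUp_length rest
    simp only [pairUp, List.length_cons, ih]
    omega

theorem two_le_of_pairUp_ne (c : List Char) (h : pairUp c ≠ []) : 2 ≤ c.length := by
  match c with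
  | [] => exact absurd rfl h
  | [a] => exact absurd rfl h
  | a :: b :: rest => simp

def bPary (c : List Char) : List (Nat × Nat) :=
  if h : pairUp c = [] then [] else
    let pairs := pairUp c
    let d := pairs.foldl (fun acc ab => if ab.1 ≠ ab.2 then acc + 1 else acc) 0
    let e := pairs.map Prod.fst
    let o := pairs.map Prod.snd
    (d, pairs.length) :: List.zipWith (fun x y => (x.1 + y.1, x.2 + y.2)) (bPary e) (bPary o)
termination_by c.length
decreasing_by
  all_goals
    have h2 := two_le_of_pairUp_ne c h
    simp only [List.length_map, pairUp_length]
    omega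

def rozwiazanie_alt (przyklad : String) : String :=
  let cs := przyklad.toList
  let poziomy := bPary cs
  let maska := poziomy.reverse.map (fun dp => if 2 * dp.1 > dp.2 then '1' else '0')
  -- codeword by doubling: each half repeats, complemented when that variable bit is '1'
  let kod := maska.reverse.foldl (fun kod bit =>
    kod ++ (if bit == '1' then kod.map (fun ch => if ch == '0' then '1' else '0') else kod)) ['0']
  let zgodne := (kod.zip cs).foldl (fun (acc : Nat) kp => acc + (if kp.1 == kp.2 then 1 else 0)) 0
  let odwrotne := (kod.zip cs).foldl (fun (acc : Nat) kp =>
    acc + (if (if kp.1 == '0' then '1' else '0') == kp.2 then 1 else 0)) 0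
  String.mk ((if odwrotne > zgodne then '1' else '0') :: maska)

-- ===== PRECONDITION & SPEC =====
-- Python A raises ValueError (math.log2(0)) on the empty string; every non-empty string is admitted.
def Pre_rozwiazanie (przyklad : String) : Prop := przyklad ≠ ""
instance (przyklad : String) : Decidable (Pre_rozwiazanie przyklad) := by unfold Pre_rozwiazanie; infer_instance
def pvWitness_rozwiazanie : String := "0110"

def Spec_rozwiazanie (przyklad : String) (out : String) : Prop := out = rozwiazanie_alt przyklad
instance (przyklad : String) (out : String) : Decidable (Spec_rozwiazanie przyklad out) := by unfold Spec_rozwiazanie; infer_instance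

-- ===== CLAIM (what is proved, stated in full; the proofs are below) =====
def Claim_equal_rozwiazanie : Prop := ∀ (przyklad : String), Dom_rozwiazanie przyklad → Pre_rozwiazanie przyklad → Spec_rozwiazanie przyklad (rozwiazanie przyklad)

-- ===== LEMMAS AND PROOFS =====

/-! generic fold / list lemmas -/

theorem pairCount {α : Type} (p : α → Bool) (l : List α) : ∀ (a b : Nat),
    l.foldl (fun (s : Nat × Nat) x => if p x then (s.1, s.2 + 1) else (s.1 + 1, s.2)) (a, b)
      = (a + l.countP (fun x => !p x), b + l.countP p) := by
  induction l with
  | nil => simp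
  | cons x xs ih =>
    intro a b
    by_cases h : p x <;> simp [List.foldl_cons, h, ih, List.countP_cons] <;> try omega

theorem pairCount2 {α : Type} (p q : α → Bool) (l : List α) : ∀ (a b : Nat),
    l.foldl (fun (s : Nat × Nat) x => ((if p x then s.1 + 1 else s.1), (if q x then s.2 + 1 else s.2))) (a, b)
      = (a + l.countP p, b + l.countP q) := by
  induction l with
  | nil => simp
  | cons x xs ih =>
    intro a b
    by_cases h : p x <;> by_cases h' : q x <;>
      simp [List.foldl_cons, h, h', ih, List.countP_cons] <;> try omega

theorem foldl_cons_rev {α β : Type} (f : α → β) (l : List α) : ∀ (acc : List β),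
    l.foldl (fun acc x => f x :: acc) acc = (l.map f).reverse ++ acc := by
  induction l with
  | nil => simp
  | cons x xs ih => intro acc; simp [List.foldl_cons, ih]

theorem flatten_map_singleton {α β : Type} (f : α → β) (l : List α) :
    (l.map (fun x => [f x])).flatten = l.map f := by
  induction l with
  | nil => simp
  | cons x xs ih => simp [ih]

theorem flatMap_eq_flatten_map {α β : Type} (f : α → List β) (l : List α) :
    l.flatMap f = (l.map f).flatten := by
  induction l with
  | nil => simp
  | cons x xs ih => simp [ih]

theorem revMapRange {α : Type} (g : Nat → α) (n : Nat) :
    ((List.range n).map g).reverse = (List.range n).map (fun k => g (n - 1 - k)) := by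
  apply List.ext_getElem
  · simp
  · intro i h1 h2
    simp only [List.getElem_reverse, List.getElem_map, List.getElem_range,
      List.length_map, List.length_range] at *
    try (congr 1; omega)

theorem countP_range_rev (p : Nat → Bool) (n : Nat) :
    (List.range n).countP (fun k => p (n - 1 - k)) = (List.range n).countP p := by
  have h1 : (List.range n).countP (fun k => p (n - 1 - k))
      = ((List.range n).map (fun k => n - 1 - k)).countP p := by
    rw [List.countP_map]; rfl
  have h2 : (List.range n).map (fun k => n - 1 - k) = (List.range n).reverse := by
    have := revMapRange (fun k : Nat => k) n
    simpa using this.symm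
  rw [h1, h2, List.countP_reverse]

theorem range_mul_filter (d h : Nat) (hh : h ≤ d) : ∀ (m : Nat),
    (List.range (m * d)).filter (fun x => decide (x % d < h))
      = (List.range m).flatMap (fun i => (List.range h).map (fun j => i * d + j)) := by
  intro m
  induction m with
  | zero => simp
  | succ m ih =>
    rw [Nat.succ_mul, List.range_add, List.filter_append, ih, List.range_succ,
      List.flatMap_append, List.flatMap_singleton]
    congr 1
    rw [List.filter_map]
    have hcong : List.filter ((fun x => decide (x % d < h)) ∘ fun x => m * d + x) (List.range d)
        = List.filter (fun t => decide (t < h)) (List.range d) := by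
      apply List.filter_congr
      intro t ht
      simp only [List.mem_range] at ht
      simp only [Function.comp]
      have hmod : (m * d + t) % d = t := by
        rw [Nat.mul_comm, Nat.mul_add_mod]
        exact Nat.mod_eq_of_lt ht
      rw [hmod]
    rw [hcong]
    have hsplit : List.range d = List.range h ++ (List.range (d - h)).map (fun t => h + t) := by
      rw [← List.range_add]; congr 1; omega
    rw [hsplit, List.filter_append]
    have h1 : (List.range h).filter (fun t => decide (t < h)) = List.range h := by
      apply List.filter_eq_self.mpr
      intro t ht
      simp only [List.mem_range] at ht
      simpa using ht
    have h2 : ((List.range (d - h)).map (fun t => h + t)).filter (fun t => decide (t < h)) = [] := by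
      apply List.filter_eq_nil_iff.mpr
      intro t ht
      simp only [List.mem_map, List.mem_range] at ht
      obtain ⟨u, _, rfl⟩ := ht
      simp
    rw [h1, h2, List.append_nil]

theorem zipMapGetD {α β : Type} [Inhabited β] (f : Nat → α) (c : List β) (m : Nat) (d : β)
    (h : m ≤ c.length) :
    ((List.range m).map f).zip c = (List.range m).map (fun x => (f x, c.getD x d)) := by
  apply List.ext_getElem
  · simp; omega
  · intro i h1 h2
    simp only [List.length_zip, List.length_map, List.length_range] at h1
    have hic : i < c.length := by omega
    simp [List.getElem_zip, List.getElem_map, List.getElem_range, List.getD_eq_getElem?_getD,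
      List.getElem?_eq_getElem hic]

/-! binary digit characterization -/

def bitChar (b : Bool) : Char := if b then '1' else '0'

def padBits (n i : Nat) : List Char := (List.range n).map (fun k => bitChar (i.testBit (n - 1 - k)))

def binAuxF : Nat → Nat → List Char
  | 0, _ => []
  | f + 1, n => if n = 0 then [] else binAuxF f (n / 2) ++ [Nat.digitChar (n % 2)]

def binAux (n : Nat) : List Char := binAuxF n n

theorem binAuxF_fuel : ∀ (f g n : Nat), n ≤ f → n ≤ g → binAuxF f n = binAuxF g n := by
  intro f
  induction f with
  | zero =>
    intro g n hf _
    interval_cases n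
    cases g <;> simp [binAuxF]
  | succ f ih =>
    intro g n hf hg
    match g, n with
    | 0, n => interval_cases n; simp [binAuxF]
    | g + 1, 0 => simp [binAuxF]
    | g + 1, n + 1 =>
      simp only [binAuxF, Nat.succ_ne_zero, if_false]
      rw [ih g ((n + 1) / 2) (by omega) (by omega)]

theorem binAux_step (n : Nat) (h : 0 < n) :
    binAux n = binAux (n / 2) ++ [Nat.digitChar (n % 2)] := by
  match n, h with
  | n + 1, _ =>
    show binAuxF (n + 1) (n + 1) = binAuxF ((n + 1) / 2) ((n + 1) / 2) ++ _
    simp only [binAuxF, Nat.succ_ne_zero, if_false]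
    rw [binAuxF_fuel n ((n + 1) / 2) ((n + 1) / 2) (by omega) (by omega)]

theorem padBits_snoc (n i : Nat) :
    padBits (n + 1) i = padBits n (i / 2) ++ [bitChar (i.testBit 0)] := by
  unfold padBits
  rw [List.range_succ, List.map_append]
  congr 1
  · apply List.map_congr_left
    intro k hk
    simp only [List.mem_range] at hk
    rw [Nat.testBit_div_two]
    congr 2
    omega
  · simp

theorem binAux_padBits : ∀ (n : Nat), ∀ (i : Nat), 2 ^ n ≤ i → i < 2 ^ (n + 1) →
    binAux i = padBits (n + 1) i := by
  intro n
  induction n with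
  | zero =>
    intro i h1 h2
    have h1' : 1 ≤ i := by simpa using h1
    have h2' : i < 2 := by simpa using h2
    have : i = 1 := by omega
    subst this
    decide
  | succ n ih =>
    intro i h1 h2
    have hi2 : 0 < i := by have := Nat.one_le_two_pow (n := n + 1); omega
    rw [binAux_step i hi2, padBits_snoc]
    have hd1 : 2 ^ n ≤ i / 2 := by
      rw [Nat.le_div_iff_mul_le (by norm_num)]
      calc 2 ^ n * 2 = 2 ^ (n + 1) := by rw [pow_succ]
      _ ≤ i := h1
    have hd2 : i / 2 < 2 ^ (n + 1) := by
      rw [Nat.div_lt_iff_lt_mul (by norm_num)]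
      calc i < 2 ^ (n + 2) := h2
      _ = 2 ^ (n + 1) * 2 := by rw [pow_succ]
    rw [ih (i / 2) hd1 hd2]
    congr 1
    have h2' : i % 2 = 0 ∨ i % 2 = 1 := by omega
    rcases h2' with h2' | h2' <;>
      simp [h2', Nat.testBit_zero, bitChar, Nat.digitChar]

theorem padBits_length (n i : Nat) : (padBits n i).length = n := by simp [padBits]

theorem padBits_pad (n m i : Nat) (hm : m ≤ n) (hi : i < 2 ^ m) :
    padBits n i = List.replicate (n - m) '0' ++ padBits m i := by
  unfold padBits
  have key : List.range n = List.range ((n - m) + m) := by rw [Nat.sub_add_cancel hm]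
  rw [key, List.range_add, List.map_append]
  congr 1
  · have hmem : ∀ b ∈ (List.range (n - m)).map (fun k => bitChar (i.testBit (n - 1 - k))), b = '0' := by
      intro b hb
      simp only [List.mem_map, List.mem_range] at hb
      obtain ⟨k, hk, rfl⟩ := hb
      have hbit : i.testBit (n - 1 - k) = false := by
        apply Nat.testBit_lt_two_pow
        calc i < 2 ^ m := hi
        _ ≤ 2 ^ (n - 1 - k) := Nat.pow_le_pow_right (by norm_num) (by omega)
      simp [hbit, bitChar]
    have := List.eq_replicate_of_mem hmem
    rwa [List.length_map, List.length_range] at this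
  · rw [List.map_map]
    apply List.map_congr_left
    intro k hk
    simp only [List.mem_range] at hk
    simp only [Function.comp]
    congr 2
    omega

theorem toDigitsCore_two : ∀ (f n : Nat) (acc : List Char), 0 < f → n < 2 ^ f →
    Nat.toDigitsCore 2 f n acc = (if n = 0 then ['0'] else binAux n) ++ acc := by
  intro f
  induction f with
  | zero => intro n acc h; omega
  | succ f ih =>
    intro n acc _ hn
    by_cases h2 : n / 2 = 0
    · have hn1 : n = 0 ∨ n = 1 := by omega
      rcases hn1 with rfl | rfl <;>
        simp [Nat.toDigitsCore, binAux, binAuxF, Nat.digitChar]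
    · have hf : 0 < f := by
        rcases Nat.eq_zero_or_pos f with rfl | hf
        · have : n < 2 := by simpa using hn
          omega
        · exact hf
      have hlt : n / 2 < 2 ^ f := by
        have hp : (2 : Nat) ^ (f + 1) = 2 ^ f * 2 := pow_succ 2 f
        omega
      have hstep : Nat.toDigitsCore 2 (f + 1) n acc
          = Nat.toDigitsCore 2 f (n / 2) (Nat.digitChar (n % 2) :: acc) := by
        simp [Nat.toDigitsCore, h2]
      rw [hstep, ih (n / 2) _ hf hlt, if_neg h2, binAux_step n (by omega), if_neg (by omega)]
      simp

theorem toDigits_two (n : Nat) : Nat.toDigits 2 n = (if n = 0 then ['0'] else binAux n) := by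
  rw [Nat.toDigits, toDigitsCore_two (n + 1) n [] (by omega)
    (lt_of_lt_of_le (Nat.lt_two_pow_self) (Nat.pow_le_pow_right (by norm_num) (by omega))),
    List.append_nil]

theorem toBinChars_nat (i : Nat) : PySem.Int.toBinChars (i : Int) = Nat.toDigits 2 i := by
  unfold PySem.Int.toBinChars
  rw [if_neg (by omega)]
  simp

-- the padded binary string of the f-string equals padBits
theorem obecne_eq (n i : Nat) (h2 : i < 2 ^ n) :
    List.replicate (n - (PySem.Int.toBinChars (i : Int)).length) '0' ++ PySem.Int.toBinChars (i : Int)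
      = if n = 0 then ['0'] else padBits n i := by
  rw [toBinChars_nat, toDigits_two]
  by_cases h0 : i = 0
  · subst h0
    cases n with
    | zero => simp
    | succ n =>
      simp only [if_pos rfl, if_neg (Nat.succ_ne_zero n)]
      have hrep : padBits (n + 1) 0 = List.replicate (n + 1) '0' := by
        have hmem : ∀ b ∈ padBits (n + 1) 0, b = '0' := by
          intro b hb
          simp only [padBits, List.mem_map, List.mem_range] at hb
          obtain ⟨k, _, rfl⟩ := hb
          simp [Nat.zero_testBit, bitChar]
        have := List.eq_replicate_of_mem hmem
        rwa [padBits_length] at this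
      rw [hrep, List.replicate_succ' (n := n)]
      simp
  · rw [if_neg h0]
    have hn : 0 < n := by
      by_contra hn
      have hn0 : n = 0 := by omega
      subst hn0
      simp at h2
      omega
    rw [if_neg (by omega)]
    have hml : 2 ^ Nat.log 2 i ≤ i := Nat.pow_log_le_self 2 h0
    have hmu : i < 2 ^ (Nat.log 2 i + 1) := Nat.lt_pow_succ_log_self (by norm_num) i
    have hb : binAux i = padBits (Nat.log 2 i + 1) i := binAux_padBits (Nat.log 2 i) i hml hmu
    have hmn : Nat.log 2 i + 1 ≤ n := by
      by_contra hc
      have hle : n ≤ Nat.log 2 i := by omega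
      have : 2 ^ n ≤ 2 ^ Nat.log 2 i := Nat.pow_le_pow_right (by norm_num) hle
      omega
    rw [hb, padBits_length]
    exact (padBits_pad n (Nat.log 2 i + 1) i hmn hmu).symm

/-! PySem.Chars.count with a single-character needle is List.count -/
theorem count_go_singleton (c : Char) : ∀ (fuel : Nat) (l : List Char) (acc : Nat),
    l.length ≤ fuel → PySem.Chars.count.go [c] fuel l acc = acc + l.count c := by
  intro fuel
  induction fuel with
  | zero =>
    intro l acc h
    have : l = [] := List.eq_nil_of_length_eq_zero (by omega)
    subst this
    simp [PySem.Chars.count.go]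
  | succ fuel ih =>
    intro l acc h
    match l with
    | [] => simp [PySem.Chars.count.go]
    | x :: t =>
      rw [PySem.Chars.count.go]
      by_cases hpre : List.isPrefixOf [c] (x :: t)
      · have hcx : c == x := by
          simpa [List.isPrefixOf] using hpre
        rw [if_pos hpre]
        simp only [List.length_cons, List.length_nil, List.length_singleton,
          List.drop_succ_cons, List.drop_zero]
        rw [ih t (acc + 1) (by simpa using Nat.lt_succ_iff.mp (by simpa using h))]
        have hxc : (x == c) = true := by
          have := eq_of_beq hcx
          simp [this]
        rw [List.count_cons, hxc]
        simp
        omega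
      · have hcx : ¬ (c == x) := by
          simpa [List.isPrefixOf] using hpre
        rw [if_neg hpre]
        rw [ih t acc (by simpa using Nat.lt_succ_iff.mp (by simpa using h))]
        have hxc : (x == c) = false := by
          by_cases hxc' : x = c
          · subst hxc'; simp at hcx
          · simp [hxc']
        rw [List.count_cons, hxc]
        simp

theorem count_singleton (s : List Char) (c : Char) :
    PySem.Chars.count s [c] = s.count c := by
  rw [PySem.Chars.count, if_neg (by simp)]
  rw [count_go_singleton c s.length s 0 le_rfl]
  simp

/-! canonical per-stride counts shared by both programs -/

def idxList (c : List Char) (b : Nat) : List Nat :=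
  (List.range (c.length / 2 ^ (b + 1) * 2 ^ (b + 1))).filter (fun x => decide (x % 2 ^ (b + 1) < 2 ^ b))

def cntR (r : Char → Char → Bool) (c : List Char) (b : Nat) : Nat :=
  (idxList c b).countP (fun x => r (c.getD x ' ') (c.getD (x + 2 ^ b) ' '))

def diffC (c : List Char) (b : Nat) : Nat := cntR (fun u v => !(u == v)) c b
def sameC (c : List Char) (b : Nat) : Nat := cntR (fun u v => u == v) c b
def totC (c : List Char) (b : Nat) : Nat := c.length / 2 ^ (b + 1) * 2 ^ b

def bitf (c : List Char) (b : Nat) : Bool := decide (diffC c b > sameC c b)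

def maskOf (c : List Char) (n : Nat) : Nat :=
  (List.range n).foldl (fun m b => if bitf c b then m ||| 2 ^ b else m) 0

def parP (c : List Char) (n i : Nat) : Bool :=
  decide (((List.range n).countP (fun b => (i &&& maskOf c n).testBit b)) % 2 = 1)

theorem fold_pair_eq (c : List Char) (b : Nat) :
    (List.range (c.length / 2 ^ (b + 1))).foldl (fun (zb : Nat × Nat) i =>
        (List.range (2 ^ b)).foldl (fun zb j =>
          if PySem.List.pyGetD (PySem.List.slice c (some ((i * 2 ^ (b + 1) : Nat) : Int)) (some (((i + 1) * 2 ^ (b + 1) : Nat) : Int))) ((j : Nat) : Int) ' '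
             == PySem.List.pyGetD (PySem.List.slice c (some ((i * 2 ^ (b + 1) : Nat) : Int)) (some (((i + 1) * 2 ^ (b + 1) : Nat) : Int))) ((j + 2 ^ b : Nat) : Int) ' '
          then (zb.1, zb.2 + 1) else (zb.1 + 1, zb.2)) zb) (0, 0)
      = (diffC c b, sameC c b) := by
  have hcong : ∀ (zb : Nat × Nat), ∀ i ∈ List.range (c.length / 2 ^ (b + 1)),
      (List.range (2 ^ b)).foldl (fun zb j =>
          if PySem.List.pyGetD (PySem.List.slice c (some ((i * 2 ^ (b + 1) : Nat) : Int)) (some (((i + 1) * 2 ^ (b + 1) : Nat) : Int))) ((j : Nat) : Int) ' '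
             == PySem.List.pyGetD (PySem.List.slice c (some ((i * 2 ^ (b + 1) : Nat) : Int)) (some (((i + 1) * 2 ^ (b + 1) : Nat) : Int))) ((j + 2 ^ b : Nat) : Int) ' '
          then (zb.1, zb.2 + 1) else (zb.1 + 1, zb.2)) zb
        = ((List.range (2 ^ b)).map (fun j => i * 2 ^ (b + 1) + j)).foldl
            (fun zb x => if c.getD x ' ' == c.getD (x + 2 ^ b) ' ' then (zb.1, zb.2 + 1) else (zb.1 + 1, zb.2)) zb := by
    intro zb i _
    rw [List.foldl_map]
    apply PySem.List.foldl_congr_mem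
    intro acc j hj
    simp only [List.mem_range] at hj
    have hdl : (i + 1) * 2 ^ (b + 1) - i * 2 ^ (b + 1) = 2 ^ (b + 1) := by
      rw [Nat.succ_mul]; omega
    have hget : ∀ t : Nat, t < 2 ^ (b + 1) →
        PySem.List.pyGetD (PySem.List.slice c (some ((i * 2 ^ (b + 1) : Nat) : Int)) (some (((i + 1) * 2 ^ (b + 1) : Nat) : Int))) ((t : Nat) : Int) ' '
          = c.getD (i * 2 ^ (b + 1) + t) ' ' := by
      intro t ht
      rw [PySem.List.slice_natCast, PySem.List.pyGetD_natCast, hdl]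
      rw [List.getD_eq_getElem?_getD, List.getElem?_take, if_pos ht, List.getElem?_drop,
        List.getD_eq_getElem?_getD]
    have hb2 : (2 : Nat) ^ (b + 1) = 2 ^ b * 2 := by rw [pow_succ]
    rw [hget j (by omega), hget (j + 2 ^ b) (by omega)]
    rw [Nat.add_assoc]
  calc (List.range (c.length / 2 ^ (b + 1))).foldl _ (0, 0)
      = (List.range (c.length / 2 ^ (b + 1))).foldl (fun zb i =>
          ((List.range (2 ^ b)).map (fun j => i * 2 ^ (b + 1) + j)).foldl
            (fun zb x => if c.getD x ' ' == c.getD (x + 2 ^ b) ' ' then (zb.1, zb.2 + 1) else (zb.1 + 1, zb.2)) zb) (0, 0) :=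
        PySem.List.foldl_congr_mem _ _ _ _ hcong
    _ = ((List.range (c.length / 2 ^ (b + 1))).flatMap (fun i => (List.range (2 ^ b)).map (fun j => i * 2 ^ (b + 1) + j))).foldl
          (fun zb x => if c.getD x ' ' == c.getD (x + 2 ^ b) ' ' then (zb.1, zb.2 + 1) else (zb.1 + 1, zb.2)) (0, 0) :=
        List.foldl_flatMap.symm
    _ = (idxList c b).foldl
          (fun zb x => if c.getD x ' ' == c.getD (x + 2 ^ b) ' ' then (zb.1, zb.2 + 1) else (zb.1 + 1, zb.2)) (0, 0) := by
        rw [← range_mul_filter (2 ^ (b + 1)) (2 ^ b)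
          (Nat.pow_le_pow_right (by norm_num) (by omega)) (c.length / 2 ^ (b + 1))]
        rfl
    _ = (diffC c b, sameC c b) := by
        rw [pairCount]
        simp [diffC, sameC, cntR]

theorem sprawdz_eq (c : List Char) (b : Nat) :
    sprawdzPozycje (b + 1) c = bitChar (bitf c b) := by
  have hpol : (2 : Nat) ^ (b + 1) / 2 = 2 ^ b := by
    rw [pow_succ]
    exact Nat.mul_div_cancel _ (by norm_num)
  simp only [sprawdzPozycje, hpol]
  rw [fold_pair_eq]
  by_cases h : diffC c b > sameC c b <;> simp [bitf, bitChar, h]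

theorem maskOf_testBit (c : List Char) : ∀ (n j : Nat),
    (maskOf c n).testBit j = (decide (j < n) && bitf c j) := by
  intro n
  induction n with
  | zero => intro j; simp [maskOf]
  | succ n ih =>
    intro j
    have hstep : maskOf c (n + 1) = (if bitf c n then maskOf c n ||| 2 ^ n else maskOf c n) := by
      unfold maskOf
      rw [List.range_succ, List.foldl_append, List.foldl_cons, List.foldl_nil]
    rw [hstep]
    by_cases hj : j = n
    · subst hj
      cases hb : bitf c j
      · simp [hb, ih]
      · simp [hb, ih, Nat.testBit_or]
    · have hd : decide (j < n + 1) = decide (j < n) := by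
        by_cases hlt : j < n
        · rw [decide_eq_true hlt, decide_eq_true (by omega : j < n + 1)]
        · rw [decide_eq_false hlt, decide_eq_false (by omega : ¬ j < n + 1)]
      cases hb : bitf c n
      · rw [if_neg (by simp), ih, hd]
      · rw [if_pos rfl, Nat.testBit_or, ih, Nat.testBit_two_pow, hd,
          (show (decide (n = j)) = false from decide_eq_false (fun hh => hj hh.symm)), Bool.or_false]

theorem toChars01 (m : Nat) (h : m < 2) :
    PySem.Int.toChars ((m : Nat) : Int) = [bitChar (decide (m = 1))] := by
  interval_cases m <;> decide

theorem wyzeruj_map (l1 l2 : List Char) :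
    wyzeruj l1 l2 = (l1.zip l2).map (fun bm => if bm.2 == '0' then '0' else bm.1) := by
  unfold wyzeruj
  have h := PySem.List.foldl_congr_mem
    (fun nowa (bm : Char × Char) => if bm.2 == '0' then nowa ++ ['0'] else nowa ++ [bm.1])
    (fun nowa bm => nowa ++ [if bm.2 == '0' then '0' else bm.1])
    ([] : List Char)
    (l := l1.zip l2)
    (fun acc bm _ => by cases hb : bm.2 == '0' <;> simp [hb])
  rw [h, PySem.List.foldl_append_singleton_eq_map, List.nil_append]

theorem szchar_eq (c : List Char) (n i : Nat) (hi : i < 2 ^ n) :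
    PySem.Int.toChars (((PySem.Chars.count (wyzeruj
        (List.replicate (n - (PySem.Int.toBinChars ((i : Nat) : Int)).length) '0' ++ PySem.Int.toBinChars ((i : Nat) : Int))
        ((List.range n).map (fun k => bitChar ((maskOf c n).testBit (n - 1 - k))))) ['1']) % 2 : Nat) : Int)
      = [bitChar (parP c n i)] := by
  rw [obecne_eq n i hi]
  cases n with
  | zero =>
    interval_cases i
    have hp : parP c 0 0 = false := by simp [parP]
    simp only [List.range_zero, List.map_nil, hp]
    decide
  | succ m =>
    rw [if_neg (Nat.succ_ne_zero m)]
    rw [wyzeruj_map]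
    simp only [padBits]
    rw [List.zip_map', List.map_map]
    rw [count_singleton]
    have hcm : ∀ {γ : Type} (f : γ → Char) (l : List γ) (a : Char),
        (l.map f).count a = l.countP (fun x => f x == a) := by
      intro γ f l a
      rw [List.count_eq_countP, List.countP_map]
      rfl
    rw [hcm]
    have hc1 := List.countP_congr
      (l := List.range (m + 1))
      (p := fun k => (((fun bm : Char × Char => if bm.2 == '0' then '0' else bm.1) ∘
        (fun a => (bitChar (i.testBit (m + 1 - 1 - a)), bitChar ((maskOf c (m + 1)).testBit (m + 1 - 1 - a))))) k == '1'))
      (q := fun k => (fun t => i.testBit t && (maskOf c (m + 1)).testBit t) (m + 1 - 1 - k))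
      (fun k _ => by
        cases hx : i.testBit (m - k) <;>
          cases hy : (maskOf c (m + 1)).testBit (m - k) <;>
            simp [Function.comp, bitChar, hx, hy])
    rw [hc1, countP_range_rev (fun t => i.testBit t && (maskOf c (m + 1)).testBit t) (m + 1)]
    have hc2 := List.countP_congr
      (l := List.range (m + 1))
      (p := fun t => i.testBit t && (maskOf c (m + 1)).testBit t)
      (q := fun t => (i &&& maskOf c (m + 1)).testBit t)
      (fun t _ => by simp [Nat.testBit_and])
    rw [hc2, toChars01 _ (Nat.mod_lt _ (by norm_num))]
    rfl

theorem zaszyfruj_eq (c : List Char) (n : Nat) :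
    zaszyfruj ((List.range n).map (fun k => bitChar ((maskOf c n).testBit (n - 1 - k))))
      = (List.range (2 ^ n)).map (fun i => bitChar (parP c n i)) := by
  simp only [zaszyfruj, List.length_map, List.length_range]
  rw [PySem.List.foldl_append_eq_flatMap, List.nil_append, flatMap_eq_flatten_map]
  rw [List.map_congr_left (fun i hi => szchar_eq c n i (List.mem_range.mp hi))]
  exact flatten_map_singleton _ _

theorem negA_eq (c : List Char) (n : Nat) (h : 2 ^ n ≤ c.length) :
    sprawdzNegacje ((List.range (2 ^ n)).map (fun i => bitChar (parP c n i))) c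
      = (if (List.range (2 ^ n)).countP (fun x => bitChar (!parP c n x) == c.getD x ' ') >
            (List.range (2 ^ n)).countP (fun x => bitChar (parP c n x) == c.getD x ' ')
         then '1' else '0') := by
  simp only [sprawdzNegacje, List.map_map]
  have hflip : ((fun ch => if ch == '0' then '1' else if ch == '1' then '0' else ch) ∘
      fun i => bitChar (parP c n i)) = fun i => bitChar (!parP c n i) := by
    funext i
    cases hp : parP c n i <;> simp [Function.comp, hp, bitChar]
  rw [hflip, zipMapGetD (fun i => bitChar (!parP c n i)) c (2 ^ n) ' ' h, List.zip_map',
    List.foldl_map]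
  rw [pairCount2]
  simp

/-! B-side lemmas: pair recursion, stride doubling, codeword doubling -/

theorem countP_not_add {α : Type} (p : α → Bool) (l : List α) :
    l.countP p + l.countP (fun x => !p x) = l.length := by
  induction l with
  | nil => simp
  | cons x xs ih => by_cases h : p x <;> simp [List.countP_cons, h] <;> omega

theorem sumIf {α : Type} (p : α → Prop) [DecidablePred p] (l : List α) : ∀ (a : Nat),
    l.foldl (fun acc x => if p x then acc + 1 else acc) a = a + l.countP (fun x => decide (p x)) := by
  induction l with
  | nil => simp
  | cons x xs ih =>
    intro a
    by_cases h : p x <;> simp [List.foldl_cons, h, ih, List.countP_cons] <;> try omega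

theorem sumIf' {α : Type} (p : α → Prop) [DecidablePred p] (l : List α) : ∀ (a : Nat),
    l.foldl (fun acc x => acc + (if p x then 1 else 0)) a = a + l.countP (fun x => decide (p x)) := by
  induction l with
  | nil => simp
  | cons x xs ih =>
    intro a
    by_cases h : p x <;> simp [List.foldl_cons, h, ih, List.countP_cons] <;> try omega

theorem pairUp_eq_map : ∀ (c : List Char),
    pairUp c = (List.range (c.length / 2)).map (fun y => (c.getD (2 * y) ' ', c.getD (2 * y + 1) ' '))
  | [] => by simp [pairUp]
  | [a] => by simp [pairUp]
  | a :: b :: rest => by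
    have ih := pairUp_eq_map rest
    have h2 : (a :: b :: rest).length / 2 = rest.length / 2 + 1 := by
      simp only [List.length_cons]; omega
    rw [show pairUp (a :: b :: rest) = (a, b) :: pairUp rest from rfl, ih, h2,
      List.range_succ_eq_map, List.map_cons, List.map_map]
    refine congrArg₂ List.cons (by simp) ?_
    apply List.map_congr_left
    intro y _
    dsimp only [Function.comp]
    rw [show 2 * Nat.succ y = 2 * y + 1 + 1 from by omega]
    simp [List.getD_cons_succ]

theorem getD_map_range {α : Type} [Inhabited α] (g : Nat → α) (m y : Nat) (d : α) (h : y < m) :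
    ((List.range m).map g).getD y d = g y := by
  rw [List.getD_eq_getElem?_getD, List.getElem?_map, List.getElem?_range h]
  rfl

theorem countP_double (p : Nat → Bool) : ∀ (N : Nat),
    (List.range (2 * N)).countP p
      = (List.range N).countP (fun y => p (2 * y)) + (List.range N).countP (fun y => p (2 * y + 1)) := by
  intro N
  induction N with
  | zero => simp
  | succ N ih =>
    rw [show 2 * (N + 1) = 2 * N + 1 + 1 from by omega, List.range_succ, List.range_succ,
      List.countP_append, List.countP_append,
      List.range_succ (n := N), List.countP_append, List.countP_append, ih]
    simp only [List.countP_cons, List.countP_nil]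
    by_cases ha : p (2 * N) <;> by_cases hb : p (2 * N + 1) <;> simp [ha, hb] <;> omega

theorem idx_len (c : List Char) (b : Nat) : (idxList c b).length = totC c b := by
  unfold idxList totC
  rw [range_mul_filter (2 ^ (b + 1)) (2 ^ b)
    (Nat.pow_le_pow_right (by norm_num) (by omega)) (c.length / 2 ^ (b + 1))]
  rw [List.length_flatMap]
  have hmap : (List.range (c.length / 2 ^ (b + 1))).map
        (fun i => ((List.range (2 ^ b)).map (fun j => i * 2 ^ (b + 1) + j)).length)
      = List.replicate (c.length / 2 ^ (b + 1)) (2 ^ b) := by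
    rw [show (fun i => ((List.range (2 ^ b)).map (fun j => i * 2 ^ (b + 1) + j)).length)
        = (fun _ : Nat => 2 ^ b) from funext (fun i => by simp), List.map_const']
    simp
  rw [hmap, List.sum_replicate, smul_eq_mul, Nat.mul_comm]

theorem diff_add_same (c : List Char) (b : Nat) : diffC c b + sameC c b = totC c b := by
  have h := countP_not_add (fun x => c.getD x ' ' == c.getD (x + 2 ^ b) ' ') (idxList c b)
  rw [idx_len] at h
  simp only [diffC, sameC, cntR]
  omega

def evensL (c : List Char) : List Char := (List.range (c.length / 2)).map (fun y => c.getD (2 * y) ' ')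
def oddsL (c : List Char) : List Char := (List.range (c.length / 2)).map (fun y => c.getD (2 * y + 1) ' ')

theorem evensL_length (c : List Char) : (evensL c).length = c.length / 2 := by simp [evensL]
theorem oddsL_length (c : List Char) : (oddsL c).length = c.length / 2 := by simp [oddsL]

theorem mod_bound_step (y q k h : Nat) (hk : k = 2 * h) (hy : y < q * k) (hc : y % k < h) :
    y + h < q * k := by
  have hkpos : 0 < k := by
    rcases Nat.eq_zero_or_pos k with h0 | h0
    · subst h0; rw [Nat.mul_zero] at hy; omega
    · exact h0
  have hdiv : y / k < q := by rw [Nat.div_lt_iff_lt_mul hkpos]; exact hy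
  have hdm : k * (y / k) + y % k = y := Nat.div_add_mod y k
  have h1 : y % k + h < k := by omega
  have h3 : y + h < k * (y / k) + k := by
    have he : y + h = k * (y / k) + (y % k + h) := by
      conv_lhs => rw [← hdm]
      ring
    rw [he]
    exact Nat.add_lt_add_left h1 _
  have h4 : k * (y / k) + k = k * (y / k + 1) := by ring
  have h5 : k * (y / k + 1) ≤ k * q := Nat.mul_le_mul_left _ (Nat.succ_le_of_lt hdiv)
  have h6 : k * q = q * k := Nat.mul_comm k q
  exact lt_of_lt_of_le (h4 ▸ h3) (h6 ▸ h5)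

theorem cntR_double (r : Char → Char → Bool) (c : List Char) (b : Nat) :
    cntR r c (b + 1) = cntR r (evensL c) b + cntR r (oddsL c) b := by
  have hpow : (2 : Nat) ^ (b + 1 + 1) = 2 * 2 ^ (b + 1) := by ring
  have hpow1 : (2 : Nat) ^ (b + 1) = 2 * 2 ^ b := by ring
  have hNm : c.length / 2 / 2 ^ (b + 1) * 2 ^ (b + 1) ≤ c.length / 2 :=
    Nat.div_mul_le_self _ _
  unfold cntR idxList
  rw [List.countP_filter, List.countP_filter, List.countP_filter]
  rw [show c.length / 2 ^ (b + 1 + 1) * 2 ^ (b + 1 + 1)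
      = 2 * (c.length / 2 / 2 ^ (b + 1) * 2 ^ (b + 1)) from by
    rw [Nat.div_div_eq_div_mul, show (2 : Nat) * 2 ^ (b + 1) = 2 ^ (b + 1 + 1) from by ring]
    ring]
  rw [countP_double, evensL_length, oddsL_length]
  congr 1
  · apply List.countP_congr
    intro y hy
    rw [List.mem_range] at hy
    have hcond : (decide ((2 * y) % 2 ^ (b + 1 + 1) < 2 ^ (b + 1)))
        = (decide (y % 2 ^ (b + 1) < 2 ^ b)) := by
      have e1 : (2 * y) % 2 ^ (b + 1 + 1) = 2 * (y % 2 ^ (b + 1)) := by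
        rw [hpow, Nat.mul_mod_mul_left]
      apply decide_eq_decide.mpr
      rw [e1]
      omega
    rw [hcond]
    by_cases hc : y % 2 ^ (b + 1) < 2 ^ b
    · have hy2 : y < c.length / 2 := lt_of_lt_of_le hy hNm
      have hyb : y + 2 ^ b < c.length / 2 :=
        lt_of_lt_of_le (mod_bound_step y _ _ _ hpow1 hy hc) hNm
      have g1 : (evensL c).getD y ' ' = c.getD (2 * y) ' ' := by
        unfold evensL; exact getD_map_range _ _ _ _ hy2
      have g2 : (evensL c).getD (y + 2 ^ b) ' ' = c.getD (2 * y + 2 ^ (b + 1)) ' ' := by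
        unfold evensL
        rw [getD_map_range _ _ _ _ hyb, show 2 * (y + 2 ^ b) = 2 * y + 2 ^ (b + 1) from by
          rw [hpow1]; ring]
      rw [g1, g2]
    · simp [hc]
  · apply List.countP_congr
    intro y hy
    rw [List.mem_range] at hy
    have hcond : (decide ((2 * y + 1) % 2 ^ (b + 1 + 1) < 2 ^ (b + 1)))
        = (decide (y % 2 ^ (b + 1) < 2 ^ b)) := by
      have hdm : 2 ^ (b + 1) * (y / 2 ^ (b + 1)) + y % 2 ^ (b + 1) = y :=
        Nat.div_add_mod y (2 ^ (b + 1))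
      have hrepr : 2 * y + 1 = (2 * (y % 2 ^ (b + 1)) + 1) + (y / 2 ^ (b + 1)) * (2 * 2 ^ (b + 1)) := by
        conv_lhs => rw [← hdm]
        ring
      have hlt : 2 * (y % 2 ^ (b + 1)) + 1 < 2 * 2 ^ (b + 1) := by
        have := Nat.mod_lt y (Nat.two_pow_pos (b + 1))
        omega
      have e1 : (2 * y + 1) % 2 ^ (b + 1 + 1) = 2 * (y % 2 ^ (b + 1)) + 1 := by
        rw [hpow, hrepr, Nat.add_mul_mod_self_right, Nat.mod_eq_of_lt hlt]
      apply decide_eq_decide.mpr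
      rw [e1]
      omega
    rw [hcond]
    by_cases hc : y % 2 ^ (b + 1) < 2 ^ b
    · have hy2 : y < c.length / 2 := lt_of_lt_of_le hy hNm
      have hyb : y + 2 ^ b < c.length / 2 :=
        lt_of_lt_of_le (mod_bound_step y _ _ _ hpow1 hy hc) hNm
      have g1 : (oddsL c).getD y ' ' = c.getD (2 * y + 1) ' ' := by
        unfold oddsL; exact getD_map_range _ _ _ _ hy2
      have g2 : (oddsL c).getD (y + 2 ^ b) ' ' = c.getD (2 * y + 1 + 2 ^ (b + 1)) ' ' := by
        unfold oddsL
        rw [getD_map_range _ _ _ _ hyb, show 2 * (y + 2 ^ b) + 1 = 2 * y + 1 + 2 ^ (b + 1) from by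
          rw [hpow1]; ring]
      rw [g1, g2]
    · simp [hc]

theorem cntR_head (r : Char → Char → Bool) (c : List Char) :
    cntR r c 0 = (List.range (c.length / 2)).countP (fun y => r (c.getD (2 * y) ' ') (c.getD (2 * y + 1) ' ')) := by
  unfold cntR idxList
  rw [List.countP_filter]
  rw [show c.length / 2 ^ (0 + 1) * 2 ^ (0 + 1) = 2 * (c.length / 2) from by
    norm_num [Nat.mul_comm]]
  rw [countP_double]
  have hodd : (List.range (c.length / 2)).countP
      (fun y => r (c.getD (2 * y + 1) ' ') (c.getD (2 * y + 1 + 2 ^ 0) ' ') && decide ((2 * y + 1) % 2 ^ (0 + 1) < 2 ^ 0)) = 0 := by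
    apply List.countP_eq_zero.mpr
    intro y _
    have hm : (2 * y + 1) % 2 = 1 := by omega
    simp [hm]
  rw [hodd, Nat.add_zero]
  apply List.countP_congr
  intro y _
  have hm : (2 * y) % 2 = 0 := by omega
  simp [hm]

theorem totC_double (c : List Char) (b : Nat) :
    totC c (b + 1) = totC (evensL c) b + totC (oddsL c) b := by
  unfold totC
  rw [evensL_length, oddsL_length]
  rw [show c.length / 2 ^ (b + 1 + 1) = c.length / 2 / 2 ^ (b + 1) from by
    rw [Nat.div_div_eq_div_mul, show (2 : Nat) * 2 ^ (b + 1) = 2 ^ (b + 1 + 1) from by ring]]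
  rw [show (2 : Nat) ^ (b + 1) = 2 * 2 ^ b from by ring]
  ring

theorem zipWith_map_same {α β γ δ : Type} (f : β → γ → δ) (g : α → β) (h : α → γ) (l : List α) :
    List.zipWith f (l.map g) (l.map h) = l.map (fun x => f (g x) (h x)) := by
  induction l with
  | nil => simp
  | cons x xs ih => simp [ih]

theorem neq_decide (u v : Char) : (decide (u ≠ v)) = !(u == v) := by
  by_cases h : u = v <;> simp [h]

theorem bPary_eq : ∀ (N : Nat) (c : List Char), c.length ≤ N →
    bPary c = (List.range (Nat.log 2 c.length)).map (fun b => (diffC c b, totC c b)) := by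
  intro N
  induction N with
  | zero =>
    intro c hc
    have : c = [] := List.eq_nil_of_length_eq_zero (by omega)
    subst this
    rw [bPary, dif_pos (show pairUp ([] : List Char) = [] from rfl)]
    simp [Nat.log_zero_right]
  | succ N ih =>
    intro c hc
    by_cases hp : pairUp c = []
    · rw [bPary, dif_pos hp]
      have hlen : c.length / 2 = 0 := by rw [← pairUp_length, hp]; rfl
      have hsmall : c.length < 2 := by omega
      have hlog : Nat.log 2 c.length = 0 := Nat.log_eq_zero_iff.mpr (Or.inl hsmall)
      rw [hlog]
      simp
    · rw [bPary, dif_neg hp]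
      dsimp only
      have h2 := two_le_of_pairUp_ne c hp
      have hpairs := pairUp_eq_map c
      have hE : (pairUp c).map Prod.fst = evensL c := by rw [hpairs, List.map_map]; rfl
      have hO : (pairUp c).map Prod.snd = oddsL c := by rw [hpairs, List.map_map]; rfl
      have hlenc : c.length / 2 ≤ N := by omega
      have hrecE := ih (evensL c) (by rw [evensL_length]; exact hlenc)
      have hrecO := ih (oddsL c) (by rw [oddsL_length]; exact hlenc)
      rw [evensL_length] at hrecE
      rw [oddsL_length] at hrecO
      have hd : (pairUp c).foldl (fun acc ab => if ab.1 ≠ ab.2 then acc + 1 else acc) 0 = diffC c 0 := by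
        rw [sumIf, Nat.zero_add, hpairs, List.countP_map]
        rw [show diffC c 0 = cntR (fun u v => !(u == v)) c 0 from rfl, cntR_head]
        apply List.countP_congr
        intro y _
        dsimp only [Function.comp]
        rw [neq_decide]
      have hdlen : (pairUp c).length = totC c 0 := by
        rw [pairUp_length]
        show c.length / 2 = c.length / 2 ^ (0 + 1) * 2 ^ 0
        norm_num
      have hlog : Nat.log 2 c.length = Nat.log 2 (c.length / 2) + 1 := by
        have hpos : 0 < Nat.log 2 c.length := Nat.log_pos (by norm_num) h2
        have hdb := Nat.log_div_base 2 c.length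
        omega
      rw [hd, hdlen, hE, hO, hrecE, hrecO, hlog,
        List.range_succ_eq_map, List.map_cons, List.map_map, zipWith_map_same]
      congr 1
      apply List.map_congr_left
      intro b _
      dsimp only [Function.comp, Nat.succ_eq_add_one]
      rw [show diffC c (b + 1) = diffC (evensL c) b + diffC (oddsL c) b from cntR_double _ c b,
        show totC c (b + 1) = totC (evensL c) b + totC (oddsL c) b from totC_double c b]

/-! the codeword-by-doubling fold -/

theorem flip_bitChar (p : Bool) :
    (if bitChar p == '0' then '1' else '0') = bitChar (!p) := by
  cases p <;> decide

theorem and_lt_testBit (x k j : Nat) (M : Nat) (hx : x < 2 ^ k) (hkj : k ≤ j) :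
    (x &&& M).testBit j = false := by
  apply Nat.testBit_lt_two_pow
  calc x &&& M ≤ x := Nat.and_le_left
    _ < 2 ^ k := hx
    _ ≤ 2 ^ j := Nat.pow_le_pow_right (by norm_num) hkj

theorem countP_succ_of_high (M x k : Nat) (hx : x < 2 ^ k) :
    (List.range (k + 1)).countP (fun j => (x &&& M).testBit j)
      = (List.range k).countP (fun j => (x &&& M).testBit j) := by
  rw [List.range_succ, List.countP_append, List.countP_cons, List.countP_nil, Nat.zero_add,
    and_lt_testBit x k k M hx le_rfl]
  simp

theorem testBit_pow_add_lt (k x j : Nat) (hj : j < k) :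
    (2 ^ k + x).testBit j = x.testBit j := Nat.testBit_two_pow_add_gt hj x

theorem testBit_pow_add_self (k x : Nat) (hx : x < 2 ^ k) :
    (2 ^ k + x).testBit k = true := by
  rw [Nat.testBit_two_pow_add_eq, Nat.testBit_lt_two_pow hx]
  rfl

theorem countP_shift (M x k : Nat) (hx : x < 2 ^ k) :
    (List.range (k + 1)).countP (fun j => ((2 ^ k + x) &&& M).testBit j)
      = (List.range k).countP (fun j => (x &&& M).testBit j) + (if M.testBit k then 1 else 0) := by
  rw [List.range_succ, List.countP_append]
  congr 1
  · apply List.countP_congr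
    intro j hj
    rw [List.mem_range] at hj
    rw [Nat.testBit_and, Nat.testBit_and, testBit_pow_add_lt k x j hj]
  · rw [List.countP_cons, List.countP_nil, Nat.zero_add, Nat.testBit_and,
      testBit_pow_add_self k x hx, Bool.true_and]

theorem parity_succ (a : Nat) : (decide ((a + 1) % 2 = 1)) = !(decide (a % 2 = 1)) := by
  by_cases h : a % 2 = 1
  · have h2 : (a + 1) % 2 = 0 := by omega
    simp [h, h2]
  · have h2 : (a + 1) % 2 = 1 := by omega
    simp [h, h2]

theorem map_range_double {α : Type} (G : Nat → α) (k : Nat) :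
    (List.range (2 ^ (k + 1))).map G
      = (List.range (2 ^ k)).map G ++ (List.range (2 ^ k)).map (fun x => G (2 ^ k + x)) := by
  rw [show (2 : Nat) ^ (k + 1) = 2 ^ k + 2 ^ k from by ring, List.range_add, List.map_append,
    List.map_map]
  rfl

theorem kod_fold (c : List Char) (n : Nat) : ∀ (k : Nat), k ≤ n →
    ((List.range k).map (fun b => bitChar (bitf c b))).foldl (fun kod bit =>
        kod ++ (if bit == '1' then kod.map (fun ch => if ch == '0' then '1' else '0') else kod)) ['0']
      = (List.range (2 ^ k)).map (fun x =>
          bitChar (decide (((List.range k).countP (fun j => (x &&& maskOf c n).testBit j)) % 2 = 1))) := by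
  intro k
  induction k with
  | zero =>
    intro _
    simp [bitChar]
  | succ k ih =>
    intro hk1
    have hkn : k < n := by omega
    rw [show (List.range (k + 1)).map (fun b => bitChar (bitf c b))
        = (List.range k).map (fun b => bitChar (bitf c b)) ++ [bitChar (bitf c k)] from by
      rw [List.range_succ, List.map_append]; rfl]
    rw [List.foldl_append, ih (by omega), List.foldl_cons, List.foldl_nil]
    have hbit : bitf c k = (maskOf c n).testBit k := by
      rw [maskOf_testBit, decide_eq_true hkn, Bool.true_and]
    rw [hbit, map_range_double]
    congr 1
    · apply List.map_congr_left
      intro x hx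
      rw [List.mem_range] at hx
      rw [countP_succ_of_high _ x k hx]
    · cases hM : (maskOf c n).testBit k
      · rw [show (bitChar false == '1') = false from by decide,
          if_neg (by simp : ¬ ((false : Bool) = true))]
        apply List.map_congr_left
        intro x hx
        rw [List.mem_range] at hx
        dsimp only [Function.comp]
        rw [countP_shift _ x k hx, hM, if_neg (by simp : ¬ ((false : Bool) = true)), Nat.add_zero]
      · rw [show (bitChar true == '1') = true from by decide, if_pos rfl, List.map_map]
        apply List.map_congr_left
        intro x hx
        rw [List.mem_range] at hx
        dsimp only [Function.comp]
        rw [flip_bitChar, countP_shift _ x k hx, hM, if_pos rfl, parity_succ]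

-- ===== main assembly =====

theorem main_key (przyklad : String) (h : przyklad ≠ "") :
    rozwiazanie przyklad = rozwiazanie_alt przyklad := by
  have hc : przyklad.toList ≠ [] := fun hnil => h (String.toList_eq_nil_iff.mp hnil)
  have hL : 0 < przyklad.toList.length :=
    Nat.pos_of_ne_zero (fun h0 => hc (List.eq_nil_of_length_eq_zero h0))
  simp only [rozwiazanie, rozwiazanie_alt]
  -- A's decoded-variable list
  rw [foldl_cons_rev, List.append_nil, List.range'_eq_map_range, List.map_map]
  have hw1 : ((List.range (Nat.log 2 przyklad.toList.length)).map
        ((fun zmienna => sprawdzPozycje zmienna przyklad.toList) ∘ fun x => 1 + x))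
      = (List.range (Nat.log 2 przyklad.toList.length)).map (fun b => bitChar (bitf przyklad.toList b)) := by
    apply List.map_congr_left
    intro b _
    dsimp only [Function.comp]
    rw [Nat.add_comm, sprawdz_eq]
  rw [hw1]
  -- B's per-stride counts and mask
  rw [bPary_eq przyklad.toList.length przyklad.toList le_rfl, List.map_reverse, List.map_map]
  have hw2 : (List.range (Nat.log 2 przyklad.toList.length)).map
        ((fun dp : Nat × Nat => if 2 * dp.1 > dp.2 then '1' else '0') ∘
          (fun b => (diffC przyklad.toList b, totC przyklad.toList b)))
      = (List.range (Nat.log 2 przyklad.toList.length)).map (fun b => bitChar (bitf przyklad.toList b)) := by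
    apply List.map_congr_left
    intro b _
    dsimp only [Function.comp]
    have ht := diff_add_same przyklad.toList b
    by_cases hb : diffC przyklad.toList b > sameC przyklad.toList b
    · rw [if_pos (by omega)]
      simp [bitf, bitChar, hb]
    · rw [if_neg (by omega)]
      simp [bitf, bitChar, hb]
  rw [hw2, List.reverse_reverse,
    kod_fold przyklad.toList (Nat.log 2 przyklad.toList.length) (Nat.log 2 przyklad.toList.length) le_rfl]
  rw [show (List.range (2 ^ Nat.log 2 przyklad.toList.length)).map (fun x =>
        bitChar (decide (((List.range (Nat.log 2 przyklad.toList.length)).countP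
          (fun j => (x &&& maskOf przyklad.toList (Nat.log 2 przyklad.toList.length)).testBit j)) % 2 = 1)))
      = (List.range (2 ^ Nat.log 2 przyklad.toList.length)).map (fun i =>
          bitChar (parP przyklad.toList (Nat.log 2 przyklad.toList.length) i)) from rfl]
  -- both masks now coincide; rewrite them into the maskOf presentation for A's encoder
  have hW : (List.reverse ((List.range (Nat.log 2 przyklad.toList.length)).map
        (fun b => bitChar (bitf przyklad.toList b))))
      = (List.range (Nat.log 2 przyklad.toList.length)).map
        (fun k => bitChar ((maskOf przyklad.toList (Nat.log 2 przyklad.toList.length)).testBit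
          (Nat.log 2 przyklad.toList.length - 1 - k))) := by
    rw [show (List.reverse ((List.range (Nat.log 2 przyklad.toList.length)).map
        (fun b => bitChar (bitf przyklad.toList b))))
      = ((List.range (Nat.log 2 przyklad.toList.length)).map
        (fun b => bitChar (bitf przyklad.toList b))).reverse from rfl, revMapRange]
    apply List.map_congr_left
    intro k hk
    rw [List.mem_range] at hk
    rw [maskOf_testBit, decide_eq_true (show Nat.log 2 przyklad.toList.length - 1 - k
      < Nat.log 2 przyklad.toList.length from by omega), Bool.true_and]
  rw [hW, zaszyfruj_eq]
  have hle : 2 ^ Nat.log 2 przyklad.toList.length ≤ przyklad.toList.length :=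
    Nat.pow_log_le_self 2 (by omega)
  rw [negA_eq przyklad.toList (Nat.log 2 przyklad.toList.length) hle]
  -- B's two agreement counts
  rw [zipMapGetD (fun i => bitChar (parP przyklad.toList (Nat.log 2 przyklad.toList.length) i))
    przyklad.toList (2 ^ Nat.log 2 przyklad.toList.length) ' ' hle]
  simp only [List.foldl_map]
  rw [sumIf', sumIf', Nat.zero_add, Nat.zero_add]
  have hcS : (List.range (2 ^ Nat.log 2 przyklad.toList.length)).countP (fun x =>
        decide ((bitChar (parP przyklad.toList (Nat.log 2 przyklad.toList.length) x)
          == przyklad.toList.getD x ' ') = true))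
      = (List.range (2 ^ Nat.log 2 przyklad.toList.length)).countP (fun x =>
          bitChar (parP przyklad.toList (Nat.log 2 przyklad.toList.length) x)
            == przyklad.toList.getD x ' ') := by
    apply List.countP_congr
    intro x _
    simp
  have hcN : (List.range (2 ^ Nat.log 2 przyklad.toList.length)).countP (fun x =>
        decide (((if bitChar (parP przyklad.toList (Nat.log 2 przyklad.toList.length) x) == '0'
          then '1' else '0') == przyklad.toList.getD x ' ') = true))
      = (List.range (2 ^ Nat.log 2 przyklad.toList.length)).countP (fun x =>
          bitChar (!parP przyklad.toList (Nat.log 2 przyklad.toList.length) x)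
            == przyklad.toList.getD x ' ') := by
    apply List.countP_congr
    intro x _
    rw [flip_bitChar]
    simp
  rw [hcS, hcN]

-- ===== VERDICT (by name: the statement is the Claim_ definition above) =====
theorem rozwiazanie_spec : Claim_equal_rozwiazanie := by
  intro przyklad _ hpre
  exact main_key przyklad hpre
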